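-- pv_equiv track=rewrite | github.com/blackt117/PycharmProjects | CSC231/Assignment 1/Assignment 1 -MadLibs1.py | find_token_one
-- ===== SOURCE A (Python) =====
-- def find_token_one (beg_index,line):
--     '''
--     Purpose: To find the specific arbitrary tokens in the input txt file. Each game has different ones. Additionally, to ensure the program is capturing
--     tokens and not independent '<' and '>' characters.
--
--     Parameters: beg_index (the index number of the potential start of a token), line (each line read from the txt file)
--
--     Return: The arbitrary token in the txt file
--     '''
--     token='' #for string concentation
--     for index in range(beg_index+1,len(line)): #manipulate the sentence of the inputfile to act as "list". Also to start at
--         #index of '<' character to store only the characters of the arbitrary token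
--         if line[index] == '>': #We've reached the end of the arbtirary token, return the result.
--             return token
--         elif line[index] == '-': #Special cases in which the arbitrary token has two words joined by a hypen (hypen is removed for a space)
--             token = str(token) + ' '
--         else:
--             token = str(token) + line[index]
-- ===== SOURCE B (Python) =====
-- def find_token_one(beg_index, line):
--     end = line.find('>', beg_index + 1)
--     if end == -1:
--         return None
--     return line[beg_index + 1:end].replace('-', ' ')
-- ===== Notes on version B (the rewrite author's own statement) =====
-- stated objective: faster
-- what changed: Replaces A's per-character accumulate-and-branch loop (with quadratic repeated string concatenation) by a find-the-'>'-delimiter, slice, and replace('-', ' ') decomposition done by three C-level str operations.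
-- intended difference: For negative beg_index whose tail line[beg_index+1:] contains no '>' while an earlier position of the line does, A's negative-index wraparound runs past the end of the string and returns a token stitched from the tail plus the start of the line up to that earlier '>', whereas B returns None because no '>' occurs at or after the start position; B's is the intended value (there is no terminated token there). — e.g. on find_token_one(-3, ">ab"): A returns some "ab", B returns none
import Mathlib
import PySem

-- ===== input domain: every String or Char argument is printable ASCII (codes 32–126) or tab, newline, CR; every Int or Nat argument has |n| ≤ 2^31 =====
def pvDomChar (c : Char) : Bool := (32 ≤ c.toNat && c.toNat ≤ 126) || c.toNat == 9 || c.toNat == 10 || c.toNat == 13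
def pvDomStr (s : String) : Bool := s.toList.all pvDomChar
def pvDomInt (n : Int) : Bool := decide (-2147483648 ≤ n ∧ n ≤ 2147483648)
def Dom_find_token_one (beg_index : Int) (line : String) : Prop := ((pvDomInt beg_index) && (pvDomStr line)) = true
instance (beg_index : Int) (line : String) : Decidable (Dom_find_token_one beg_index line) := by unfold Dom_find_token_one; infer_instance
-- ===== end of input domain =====

-- B replaces A's per-character accumulate-and-branch loop by find('>')-then-slice-then-replace('-',' ') (faster in a timing run: no repeated concatenation).

-- ===== PORT A =====
-- the for-loop over range(beg_index+1, len(line)) with the accumulated token (token kept as List Char; converted on return)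
def pvTokA (line : List Char) (idxs : List Int) (token : List Char) : Option (List Char) :=
  match idxs with
  | [] => none
  | i :: rest =>
    match PySem.List.pyGet? line i with
    | none => none   -- IndexError (excluded by Pre_find_token_one)
    | some c =>
      if c = '>' then some token
      else if c = '-' then pvTokA line rest (token ++ [' '])
      else pvTokA line rest (token ++ [c])

def find_token_one (beg_index : Int) (line : String) : Option String :=
  (pvTokA line.toList (PySem.List.pyRange (beg_index + 1) (PySem.Str.len line)) []).map String.ofList

-- ===== PORT B =====
def find_token_one_alt (beg_index : Int) (line : String) : Option String :=
  let e := PySem.Str.findFrom line ">" (beg_index + 1)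
  if e = -1 then none
  else some (PySem.Str.replace (PySem.Str.slice line (some (beg_index + 1)) (some e)) "-" " ")

-- ===== PRECONDITION & SPEC =====
-- Pre_ excludes exactly the inputs where A raises IndexError: beg_index + 1 below -len(line).
def Pre_find_token_one (beg_index : Int) (line : String) : Prop :=
  -(line.toList.length : Int) ≤ beg_index + 1
instance (beg_index : Int) (line : String) : Decidable (Pre_find_token_one beg_index line) := by
  unfold Pre_find_token_one; infer_instance
def pvWitness_find_token_one : Int × String := (0, "<ab-cd> words")

-- For negative beg_index whose tail line[beg_index+1:] contains no '>' while an earlier position of the line does, A's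
-- negative-index wraparound runs past the end of the string and returns a token stitched from the tail plus the start of
-- the line up to that earlier '>', whereas B returns None because no '>' occurs at or after the start position; B's is
-- the intended value (there is no terminated token there).
def D_find_token_one (beg_index : Int) (line : String) : Prop :=
  beg_index + 1 < 0 ∧ -(line.toList.length : Int) ≤ beg_index + 1 ∧
    '>' ∉ line.toList.drop (beg_index + 1 + line.toList.length).toNat ∧ '>' ∈ line.toList
instance (beg_index : Int) (line : String) : Decidable (D_find_token_one beg_index line) := by
  unfold D_find_token_one; infer_instance

def Spec_find_token_one (beg_index : Int) (line : String) (out : Option String) : Prop :=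
  ¬ D_find_token_one beg_index line → out = find_token_one_alt beg_index line
instance (beg_index : Int) (line : String) (out : Option String) : Decidable (Spec_find_token_one beg_index line out) := by
  unfold Spec_find_token_one; infer_instance

def pvDiffWitness_find_token_one : Int × String := (-3, ">ab")
def pvDiffWitnessOut_find_token_one : (Option String) × (Option String) := (some "ab", none)

-- ===== CLAIM (what is proved, stated in full; the proofs are below) =====
def Claim_unchanged_find_token_one : Prop := ∀ (beg_index : Int) (line : String), Dom_find_token_one beg_index line → Pre_find_token_one beg_index line → Spec_find_token_one beg_index line (find_token_one beg_index line)
def Claim_changed_find_token_one : Prop := Dom_find_token_one (pvDiffWitness_find_token_one.1) (pvDiffWitness_find_token_one.2) ∧ Pre_find_token_one (pvDiffWitness_find_token_one.1) (pvDiffWitness_find_token_one.2) ∧ D_find_token_one (pvDiffWitness_find_token_one.1) (pvDiffWitness_find_token_one.2) ∧ find_token_one (pvDiffWitness_find_token_one.1) (pvDiffWitness_find_token_one.2) = pvDiffWitnessOut_find_token_one.1 ∧ find_token_one_alt (pvDiffWitness_find_token_one.1) (pvDiffWitness_find_token_one.2) = pvDiffWitnessOut_find_token_one.2 ∧ pvDiffWitnessOut_find_token_one.1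 ≠ pvDiffWitnessOut_find_token_one.2
def Claim_exact_find_token_one : Prop := ∀ (beg_index : Int) (line : String), Dom_find_token_one beg_index line → Pre_find_token_one beg_index line → D_find_token_one beg_index line → find_token_one beg_index line ≠ find_token_one_alt beg_index line

-- ===== LEMMAS AND PROOFS =====

def pvSub (c : Char) : Char := if c = '-' then ' ' else c

theorem pvReplaceGo (fuel : Nat) : ∀ (l acc : List Char), l.length ≤ fuel →
    PySem.Chars.replace.go ['-'] [' '] fuel l acc = acc.reverse ++ l.map pvSub := by
  induction fuel with
  | zero => intro l acc h
            have : l = [] := List.eq_nil_of_length_eq_zero (by omega)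
            subst this; simp [PySem.Chars.replace.go]
  | succ n ih =>
    intro l acc h
    match l with
    | [] => simp [PySem.Chars.replace.go]
    | c :: t =>
      by_cases hc : c = '-'
      · subst hc
        rw [show PySem.Chars.replace.go ['-'] [' '] (n+1) ('-' :: t) acc
            = PySem.Chars.replace.go ['-'] [' '] n t (' ' :: acc) by
          simp [PySem.Chars.replace.go, List.isPrefixOf]]
        rw [ih t (' ' :: acc) (by simpa using Nat.le_of_succ_le_succ (by simpa using h))]
        simp [pvSub]
      · rw [show PySem.Chars.replace.go ['-'] [' '] (n+1) (c :: t) acc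
            = PySem.Chars.replace.go ['-'] [' '] n t (c :: acc) by
          simp only [PySem.Chars.replace.go, List.isPrefixOf]
          simp [Ne.symm hc]]
        rw [ih t (c :: acc) (by simpa using h)]
        simp [pvSub, hc]

theorem pvReplaceMap (l : List Char) :
    PySem.Chars.replace l ['-'] [' '] = l.map pvSub := by
  simp [PySem.Chars.replace, pvReplaceGo l.length l [] le_rfl]

theorem pvInfixSingleton (l : List Char) : ['>'] <:+: l ↔ '>' ∈ l := by
  constructor
  · intro h; exact h.mem (by simp)
  · intro h
    obtain ⟨p, q, rfl⟩ := List.mem_iff_append.mp h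
    exact ⟨p, q, by simp⟩

theorem pvTakeFirst (m : List Char) : ∀ (r : Nat), m[r]? = some '>' →
    (∀ i < r, m[i]? ≠ some '>') → m.take r = m.takeWhile (· ≠ '>') := by
  induction m with
  | nil => intro r h; simp at h
  | cons c t ih =>
    intro r h h2
    match r with
    | 0 => simp at h; simp [h]
    | r + 1 =>
      have hc : c ≠ '>' := by
        have := h2 0 (by omega); simpa using this
      simp only [List.take_succ_cons, List.takeWhile_cons]
      rw [if_pos (by simpa using hc)]
      rw [ih r (by simpa using h) (fun i hi => by simpa using h2 (i+1) (by omega))]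

theorem pvRangeNil (a b : Int) (h : b ≤ a) : PySem.List.pyRange a b = [] := by
  have := PySem.List.pyRange_one a b
  rw [this, show (b - a).toNat = 0 by omega]
  simp

-- head-step facts used by both loop lemmas
theorem pvMemCons (c : Char) (t : List Char) (hgt : c ≠ '>') : '>' ∈ c :: t ↔ '>' ∈ t := by
  simp [eq_comm, hgt, Ne.symm hgt]

theorem pvTakeWhileCons (c : Char) (t : List Char) (hgt : c ≠ '>') :
    (c :: t).takeWhile (· ≠ '>') = c :: t.takeWhile (· ≠ '>') := by
  simp [List.takeWhile_cons, hgt]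

theorem pvTokANonnegAux (cs : List Char) (m : Nat) :
    ∀ (k : Nat) (acc : List Char), cs.length - k = m →
    pvTokA cs (PySem.List.pyRange (k : Int) (cs.length : Int)) acc =
      if '>' ∈ cs.drop k then some (acc ++ ((cs.drop k).takeWhile (· ≠ '>')).map pvSub)
      else none := by
  induction m with
  | zero =>
    intro k acc h
    rw [pvRangeNil _ _ (by omega), List.drop_of_length_le (by omega)]
    simp [pvTokA]
  | succ n ih =>
    intro k acc h
    have hk : k < cs.length := by omega
    rw [PySem.List.pyRange_one_cons (by exact_mod_cast hk)]
    rw [show ((k : Int) + 1) = ((k + 1 : Nat) : Int) by push_cast; ring]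
    simp only [pvTokA, PySem.List.pyGet?_natCast, List.getElem?_eq_getElem hk]
    rw [List.drop_eq_getElem_cons hk]
    by_cases hgt : cs[k] = '>'
    · rw [if_pos hgt, hgt, if_pos (List.mem_cons_self), List.takeWhile_cons]
      simp
    · simp only [if_neg hgt, pvMemCons _ _ hgt, pvTakeWhileCons _ _ hgt, List.map_cons]
      by_cases hhy : cs[k] = '-'
      · rw [if_pos hhy, ih (k+1) (acc ++ [' ']) (by omega)]
        rw [show pvSub cs[k] = ' ' by simp [pvSub, hhy]]
        by_cases hm : '>' ∈ cs.drop (k+1) <;> simp [hm]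
      · rw [if_neg hhy, ih (k+1) (acc ++ [cs[k]]) (by omega)]
        rw [show pvSub cs[k] = cs[k] by simp [pvSub, hhy]]
        by_cases hm : '>' ∈ cs.drop (k+1) <;> simp [hm]

theorem pvTokANegAux (cs : List Char) (m : Nat) :
    ∀ (k : Nat) (acc : List Char), k ≤ cs.length → cs.length - k = m →
    pvTokA cs (PySem.List.pyRange ((k : Int) - (cs.length : Int)) (cs.length : Int)) acc =
      if '>' ∈ cs.drop k then some (acc ++ ((cs.drop k).takeWhile (· ≠ '>')).map pvSub)
      else pvTokA cs (PySem.List.pyRange 0 (cs.length : Int)) (acc ++ (cs.drop k).map pvSub) := by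
  induction m with
  | zero =>
    intro k acc hk h
    have : k = cs.length := by omega
    subst this
    rw [show ((cs.length : Int) - (cs.length : Int)) = 0 by ring]
    simp [List.drop_of_length_le]
  | succ n ih =>
    intro k acc hk h
    have hklt : k < cs.length := by omega
    have hgetc : PySem.List.pyGet? cs ((k : Int) - (cs.length : Int)) = some cs[k] := by
      rw [show ((k : Int) - (cs.length : Int)) = -(((cs.length - k : Nat)) : Int) by omega,
          PySem.List.pyGet?_neg_natCast cs (cs.length - k) (by omega) (by omega),
          show cs.length - (cs.length - k) = k by omega, List.getElem?_eq_getElem hklt]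
    rw [PySem.List.pyRange_one_cons (by omega)]
    simp only [pvTokA, hgetc]
    rw [show ((k : Int) - (cs.length : Int) + 1) = ((k + 1 : Nat) : Int) - (cs.length : Int) by push_cast; ring]
    rw [List.drop_eq_getElem_cons hklt]
    by_cases hgt : cs[k] = '>'
    · rw [if_pos hgt, hgt, if_pos (List.mem_cons_self), List.takeWhile_cons]
      simp
    · simp only [if_neg hgt, pvMemCons _ _ hgt, pvTakeWhileCons _ _ hgt, List.map_cons, List.map_cons]
      by_cases hhy : cs[k] = '-'
      · rw [if_pos hhy, ih (k+1) (acc ++ [' ']) (by omega) (by omega)]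
        rw [show pvSub cs[k] = ' ' by simp [pvSub, hhy]]
        by_cases hm : '>' ∈ cs.drop (k+1) <;> simp [hm]
      · rw [if_neg hhy, ih (k+1) (acc ++ [cs[k]]) (by omega) (by omega)]
        rw [show pvSub cs[k] = cs[k] by simp [pvSub, hhy]]
        by_cases hm : '>' ∈ cs.drop (k+1) <;> simp [hm]

theorem pvFindFromNat (cs : List Char) (s : Int) (k : Nat) (hsn : s < cs.length)
    (hk : (k : Int) = if s < 0 then s + cs.length else s) :
    PySem.Chars.findFrom cs ['>'] s none =
      if PySem.Chars.find (cs.drop k) ['>'] = -1 then -1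
      else (k : Int) + PySem.Chars.find (cs.drop k) ['>'] := by
  simp only [PySem.Chars.findFrom]
  rw [show (if s < 0 then if s + ↑cs.length < 0 then 0 else s + ↑cs.length else s) = (k : Int) by
    split at hk <;> split <;> omega]
  rw [if_neg (by omega)]
  simp

theorem pvFindFromHigh (cs : List Char) (s : Int) (h : (cs.length : Int) ≤ s) :
    PySem.Chars.findFrom cs ['>'] s none = -1 := by
  simp only [PySem.Chars.findFrom]
  rw [show (if s < 0 then if s + ↑cs.length < 0 then 0 else s + ↑cs.length else s) = s by
    split <;> omega]
  rcases eq_or_lt_of_le h with heq | hlt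
  · rw [if_neg (by omega), ← heq]
    rw [show PySem.Chars.find (List.drop (↑cs.length : Int).toNat (List.take (↑cs.length : Int).toNat cs)) ['>'] = -1 by
      simp [List.drop_of_length_le]; rfl]
    simp
  · rw [if_pos hlt]

theorem pvPrefixSingleton (l : List Char) : ['>'] <+: l ↔ l[0]? = some '>' := by
  cases l with
  | nil => simp
  | cons a t => simp [List.cons_prefix_cons]; tauto

theorem pvFound (line : String) (s : Int) (k : Nat)
    (hk : PySem.List.clampIdx line.toList.length s = k) (hkn : k ≤ line.toList.length)
    (hmem : '>' ∈ line.toList.drop k) :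
    String.ofList ((((line.toList.drop k).takeWhile (· ≠ '>')).map pvSub))
      = PySem.Str.replace (PySem.Str.slice line (some s)
          (some ((k : Int) + PySem.Chars.find (line.toList.drop k) ['>']))) "-" " " := by
  set m := line.toList.drop k with hm
  have hr0 : 0 ≤ PySem.Chars.find m ['>'] :=
    (PySem.Chars.find_nonneg_iff _ _).mpr ((pvInfixSingleton _).mpr hmem)
  set r := PySem.Chars.find m ['>'] with hrdef
  have hrle : r ≤ (m.length : Int) := PySem.Chars.find_le_length _ _
  have hml : m.length = line.toList.length - k := by rw [hm, List.length_drop]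
  have hspec := PySem.Chars.find_spec (s := m) (sub := ['>']) hr0
  have h1 : m[r.toNat]? = some '>' := by
    have := (pvPrefixSingleton _).mp hspec.1
    rwa [List.getElem?_drop, Nat.add_zero] at this
  have h2 : ∀ i < r.toNat, m[i]? ≠ some '>' := by
    intro i hi hcon
    exact hspec.2 i hi ((pvPrefixSingleton _).mpr (by rwa [List.getElem?_drop, Nat.add_zero]))
  rw [← String.toList_inj, String.toList_ofList, PySem.Str.toList_replace,
      show ("-" : String).toList = ['-'] from rfl, show (" " : String).toList = [' '] from rfl,
      pvReplaceMap, PySem.Str.toList_slice]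
  have hslice : PySem.Chars.slice line.toList (some s) (some ((k : Int) + r)) = m.take r.toNat := by
    simp only [PySem.Chars.slice, PySem.List.slice, hk]
    rw [show PySem.List.clampIdx line.toList.length ((k : Int) + r) = k + r.toNat by
      simp only [PySem.List.clampIdx]
      rw [if_neg (by omega)]
      omega]
    rw [← hm, show k + r.toNat - k = r.toNat by omega]
  rw [hslice, pvTakeFirst m r.toNat h1 h2]

theorem pvTokAHelper (cs : List Char) (k : Nat) (acc : List Char) :
    pvTokA cs (PySem.List.pyRange (k : Int) (cs.length : Int)) acc =
      if '>' ∈ cs.drop k then some (acc ++ ((cs.drop k).takeWhile (· ≠ '>')).map pvSub)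
      else none :=
  pvTokANonnegAux cs (cs.length - k) k acc rfl

theorem pvTokANegHelper (cs : List Char) (k : Nat) (acc : List Char) (hk : k ≤ cs.length) :
    pvTokA cs (PySem.List.pyRange ((k : Int) - (cs.length : Int)) (cs.length : Int)) acc =
      if '>' ∈ cs.drop k then some (acc ++ ((cs.drop k).takeWhile (· ≠ '>')).map pvSub)
      else pvTokA cs (PySem.List.pyRange 0 (cs.length : Int)) (acc ++ (cs.drop k).map pvSub) :=
  pvTokANegAux cs (cs.length - k) k acc hk rfl

-- ===== VERDICT (by name: the statement is the Claim_ definition above) =====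
theorem find_token_one_spec : Claim_unchanged_find_token_one := by
  intro beg line _ hPre hnD
  unfold Pre_find_token_one at hPre
  unfold D_find_token_one at hnD
  show _ = _
  simp only [find_token_one, find_token_one_alt, PySem.Str.len_eq, PySem.Str.findFrom_eq,
    show (">" : String).toList = ['>'] from rfl]
  set cs := line.toList with hcs
  set s := beg + 1 with hs
  by_cases hhigh : (cs.length : Int) ≤ s
  · rw [pvFindFromHigh cs s hhigh, if_pos rfl, pvRangeNil _ _ hhigh]
    rfl
  push_neg at hhigh
  by_cases hneg : s < 0
  · -- negative start inside the string: wraparound region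
    set k := (s + cs.length).toNat with hkdef
    have hk : (k : Int) = s + cs.length := by omega
    have hkn : k < cs.length := by omega
    rw [pvFindFromNat cs s k hhigh (by rw [if_pos hneg]; omega)]
    rw [show s = ((k : Int) - (cs.length : Int)) by omega,
        pvTokANegHelper cs k [] (by omega)]
    have hcases : '>' ∈ cs.drop k ∨ '>' ∉ cs := by
      by_contra hc
      push_neg at hc
      exact hnD ⟨by omega, by omega, hc.1, hc.2⟩
    rcases hcases with hmem | hnm
    · have hr0 : 0 ≤ PySem.Chars.find (cs.drop k) ['>'] :=
        (PySem.Chars.find_nonneg_iff _ _).mpr ((pvInfixSingleton _).mpr hmem)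
      rw [if_neg (show ¬(PySem.Chars.find (cs.drop k) ['>'] = -1) by omega),
          if_neg (show ¬((k : Int) + PySem.Chars.find (cs.drop k) ['>'] = -1) by omega),
          if_pos hmem]
      simp only [Option.map_some, List.nil_append]
      rw [pvFound line s k (by
            rw [← hcs]
            simp only [PySem.List.clampIdx]
            rw [if_pos hneg, if_neg (by omega)]
            omega) (by rw [← hcs]; omega) hmem]
      rw [hcs, show s = ((k : Int) - (line.toList.length : Int)) by rw [← hcs]; omega]
    · have hnd : '>' ∉ cs.drop k := fun h => hnm (List.mem_of_mem_drop h)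
      have hfind : PySem.Chars.find (cs.drop k) ['>'] = -1 :=
        (PySem.Chars.find_eq_neg_one_iff _ _).mpr (fun h => hnd ((pvInfixSingleton _).mp h))
      rw [if_neg hnd, show (0 : Int) = ((0 : Nat) : Int) from rfl, pvTokAHelper cs 0 _,
          if_neg (by simpa using hnm), hfind]
      simp
  · -- ordinary nonnegative start
    push_neg at hneg
    set k := s.toNat with hkdef
    have hk : (k : Int) = s := by omega
    rw [pvFindFromNat cs s k hhigh (by rw [if_neg (by omega)]; omega)]
    rw [show s = (k : Int) from hk.symm, pvTokAHelper cs k []]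
    by_cases hmem : '>' ∈ cs.drop k
    · have hr0 : 0 ≤ PySem.Chars.find (cs.drop k) ['>'] :=
        (PySem.Chars.find_nonneg_iff _ _).mpr ((pvInfixSingleton _).mpr hmem)
      rw [if_neg (show ¬(PySem.Chars.find (cs.drop k) ['>'] = -1) by omega),
          if_neg (show ¬((k : Int) + PySem.Chars.find (cs.drop k) ['>'] = -1) by omega),
          if_pos hmem]
      simp only [Option.map_some, List.nil_append]
      rw [pvFound line s k (by
            rw [← hcs]
            simp only [PySem.List.clampIdx]
            rw [if_neg (by omega)]
            omega) (by rw [← hcs]; omega) hmem]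
      rw [hcs, show s = ((k : Int)) from hk.symm]
    · have hfind : PySem.Chars.find (cs.drop k) ['>'] = -1 :=
        (PySem.Chars.find_eq_neg_one_iff _ _).mpr (fun h => hmem ((pvInfixSingleton _).mp h))
      rw [if_neg hmem, hfind]
      simp

theorem find_token_one_changed : Claim_changed_find_token_one := by
  unfold Claim_changed_find_token_one; decide

theorem find_token_one_tight : Claim_exact_find_token_one := by
  intro beg line _ hPre hD
  obtain ⟨hneg, hge, hnd, hmem⟩ := hD
  unfold Pre_find_token_one at hPre
  simp only [find_token_one, find_token_one_alt, PySem.Str.len_eq, PySem.Str.findFrom_eq,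
    show (">" : String).toList = ['>'] from rfl]
  set cs := line.toList with hcs
  set s := beg + 1 with hs
  have hlen0 : 0 < cs.length := List.length_pos_iff.mpr (by rintro h; rw [h] at hmem; simp at hmem)
  set k := (s + cs.length).toNat with hkdef
  have hk : (k : Int) = s + cs.length := by omega
  have hkn : k < cs.length := by omega
  have hfind : PySem.Chars.find (cs.drop k) ['>'] = -1 :=
    (PySem.Chars.find_eq_neg_one_iff _ _).mpr (fun h => hnd ((pvInfixSingleton _).mp h))
  rw [pvFindFromNat cs s k (by omega) (by rw [if_pos hneg]; omega)]
  rw [show s = ((k : Int) - (cs.length : Int)) by omega,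
      pvTokANegHelper cs k [] (by omega), if_neg hnd,
      show (0 : Int) = ((0 : Nat) : Int) from rfl, pvTokAHelper cs 0 _,
      if_pos (by simpa using hmem), hfind]
  simp
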